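-- pv_equiv track=rewrite | github.com/arniknz/sports_programming | olproga/tbank_sre/Dtest.py | visited_count
-- ===== SOURCE A (Python) =====
-- def visited_count(n, k):
--     total_files = 2**n
--
--     # Узлы дерева
--     class Node:
--         def __init__(self, left=None, right=None, file_id=None):
--             self.left = left
--             self.right = right
--             self.file_id = file_id
--
--     # Построение дерева
--     def build(base, size):
--         if size == 1:
--             return Node(file_id=base)
--         half = size // 2
--         left = build(base, half)
--         right = build(base + half, half)
--         return Node(left, right)
--
--     root = build(1, total_files)
--
--     visited = 0
--     direction = 0  # глобальный счётчик L/R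
--     stack = [(root, [])]  # стек: (узел, список уже посещённых детей)
--
--     while stack:
--         node, used = stack[-1]
--         visited += 1  # каждый вход в узел считается
--
--         if node.file_id is not None:
--             if node.file_id == k:
--                 return visited
--             stack.pop()
--             continue
--
--         choice = direction % 2
--         direction += 1
--
--         if choice == 0 and "L" not in used:
--             stack[-1][1].append("L")
--             stack.append((node.left, []))
--         elif choice == 1 and "R" not in used:
--             stack[-1][1].append("R")
--             stack.append((node.right, []))
--         else:
--             if "L" not in used:
--                 stack[-1][1].append("L")
--                 stack.append((node.left, []))
--             elif "R" not in used:
--                 stack[-1][1].append("R")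
--                 stack.append((node.right, []))
--             else:
--                 stack.pop()
--
--     return visited
-- ===== SOURCE B (Python) =====
-- def visited_count(n, k):
--     # Recursive DFS over leaf ranges (base, size); no tree is built.
--     visited = 0
--     direction = 0
--
--     def dfs(base, size):
--         nonlocal visited, direction
--         used = []
--         while True:
--             visited += 1
--             if size == 1:
--                 return base == k
--             choice = direction % 2
--             direction += 1
--             if choice == 0 and "L" not in used:
--                 used.append("L")
--                 if dfs(base, size // 2):
--                     return True
--             elif choice == 1 and "R" not in used:
--                 used.append("R")
--                 if dfs(base + size // 2, size // 2):
--                     return True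
--             else:
--                 if "L" not in used:
--                     used.append("L")
--                     if dfs(base, size // 2):
--                         return True
--                 elif "R" not in used:
--                     used.append("R")
--                     if dfs(base + size // 2, size // 2):
--                         return True
--                 else:
--                     return False
--
--     dfs(1, 2 ** n)
--     return visited
-- ===== Notes on version B (the rewrite author's own statement) =====
-- stated objective: faster
-- what changed: Replaces the Node class, the explicit tree construction and the explicit stack machine by a recursive DFS over leaf ranges (base, size) that never materialises the tree, threading visited/direction as nonlocals.
import Mathlib
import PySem

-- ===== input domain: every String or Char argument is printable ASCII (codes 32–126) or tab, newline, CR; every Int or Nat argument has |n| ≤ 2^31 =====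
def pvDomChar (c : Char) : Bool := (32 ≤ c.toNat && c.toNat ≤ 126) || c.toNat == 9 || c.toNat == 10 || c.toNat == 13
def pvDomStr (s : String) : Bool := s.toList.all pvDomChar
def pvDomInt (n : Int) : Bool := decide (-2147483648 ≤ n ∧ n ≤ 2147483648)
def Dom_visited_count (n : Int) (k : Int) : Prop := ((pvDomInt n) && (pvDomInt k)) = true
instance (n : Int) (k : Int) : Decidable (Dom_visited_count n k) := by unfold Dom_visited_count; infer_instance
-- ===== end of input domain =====

-- B drops A's Node class, tree construction and explicit stack machine for a recursive DFS
-- over leaf ranges (base, size); objective: faster (no tree is materialised).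

-- ===== PORT A =====
-- A's local Node class: leaf carries file_id, internal node carries children.
inductive PNode : Type
  | leaf : Int → PNode
  | node : PNode → PNode → PNode

-- fuel bound for A's while-loop (exact number of loop iterations of a full traversal);
-- computed only as a totality guard for the loop below
def costF : PNode → Nat
  | .leaf _ => 1
  | .node l r => 3 + costF l + costF r

def frameCost : PNode × List String → Nat
  | (.leaf _, _) => 1
  | (.node l r, used) =>
      1 + (if "L" ∈ used then 0 else 1 + costF l) + (if "R" ∈ used then 0 else 1 + costF r)

def stackCost (st : List (PNode × List String)) : Nat := (st.map frameCost).sum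

-- A's build(base, size); structural on a depth fuel (= n, since size = 2^n is halved each
-- level); 'size ≤ 1' is Python's 'size == 1' (size = 0 never occurs)
def buildA : Nat → Int → Nat → PNode
  | 0, base, _ => .leaf base
  | g + 1, base, size =>
    if size ≤ 1 then .leaf base
    else
      let half := size / 2
      .node (buildA g base half) (buildA g (base + (half : Int)) half)

-- A's while-loop over the explicit stack (top of stack at the HEAD of the list here;
-- Python keeps it at the end — same frames, same visit order). The fuel only makes the
-- loop total; it is chosen ≥ the number of iterations, so the 0 case is unreachable.
def runA (k : Int) : Nat → List (PNode × List String) → Int → Int → Int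
  | _, [], v, _ => v
  | 0, _ :: _, v, _ => v
  | f + 1, (t, used) :: rest, v, d =>
    match t with
    | .leaf id => if id = k then v + 1 else runA k f rest (v + 1) d
    | .node l r =>
      let choice := PySem.Int.mod d 2
      if choice = 0 ∧ "L" ∉ used then
        runA k f ((l, []) :: (PNode.node l r, used ++ ["L"]) :: rest) (v + 1) (d + 1)
      else if choice = 1 ∧ "R" ∉ used then
        runA k f ((r, []) :: (PNode.node l r, used ++ ["R"]) :: rest) (v + 1) (d + 1)
      else if "L" ∉ used then
        runA k f ((l, []) :: (PNode.node l r, used ++ ["L"]) :: rest) (v + 1) (d + 1)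
      else if "R" ∉ used then
        runA k f ((r, []) :: (PNode.node l r, used ++ ["R"]) :: rest) (v + 1) (d + 1)
      else runA k f rest (v + 1) (d + 1)

def visited_count (n : Int) (k : Int) : Int :=
  let root := buildA n.toNat 1 (2 ^ n.toNat)
  runA k (stackCost [(root, [])]) [(root, [])] 0 0

-- ===== PORT B =====
-- B's dfs: one call = the while-loop of dfs(base, size) resumed with local state 'used';
-- second/third components of the result thread the nonlocals (visited, direction).
-- Structural on a fuel that only makes the recursion total (it bounds the recursion
-- depth, which is < 3*size + 2, so the 0 case is unreachable); 'size ≤ 1' is Python's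
-- 'size == 1' (size = 0 never occurs).
def dfsB (k base : Int) : Nat → Nat → List String → Int → Int → Bool × Int × Int
  | 0, _, _, v, d => (false, v, d)
  | f + 1, size, used, v, d =>
    if size ≤ 1 then (base == k, v + 1, d)
    else
      let choice := PySem.Int.mod d 2
      let d := d + 1
      let half := size / 2
      if choice = 0 ∧ "L" ∉ used then
        let r := dfsB k base f half [] (v + 1) d
        if r.1 then r else dfsB k base f size (used ++ ["L"]) r.2.1 r.2.2
      else if choice = 1 ∧ "R" ∉ used then
        let r := dfsB k (base + (half : Int)) f half [] (v + 1) d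
        if r.1 then r else dfsB k base f size (used ++ ["R"]) r.2.1 r.2.2
      else if "L" ∉ used then
        let r := dfsB k base f half [] (v + 1) d
        if r.1 then r else dfsB k base f size (used ++ ["L"]) r.2.1 r.2.2
      else if "R" ∉ used then
        let r := dfsB k (base + (half : Int)) f half [] (v + 1) d
        if r.1 then r else dfsB k base f size (used ++ ["R"]) r.2.1 r.2.2
      else (false, v + 1, d)

def visited_count_alt (n : Int) (k : Int) : Int :=
  (dfsB k 1 (3 * 2 ^ n.toNat + 2) (2 ^ n.toNat) [] 0 0).2.1

-- ===== PRECONDITION & SPEC =====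
-- Pre_ excludes n < 0, on which Python A raises (2**n is a float there, so build recurses forever: RecursionError).
def Pre_visited_count (n : Int) (_k : Int) : Prop := 0 ≤ n
instance (n : Int) (k : Int) : Decidable (Pre_visited_count n k) := by
  unfold Pre_visited_count; infer_instance
def pvWitness_visited_count : Int × Int := (2, 3)

def Spec_visited_count (n : Int) (k : Int) (out : Int) : Prop := out = visited_count_alt n k
instance (n : Int) (k : Int) (out : Int) : Decidable (Spec_visited_count n k out) := by
  unfold Spec_visited_count; infer_instance

-- ===== CLAIM (what is proved, stated in full; the proofs are below) =====
def Claim_equal_visited_count : Prop := ∀ (n : Int) (k : Int), Dom_visited_count n k → Pre_visited_count n k → Spec_visited_count n k (visited_count n k)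

-- ===== LEMMAS AND PROOFS =====

-- pending direction slots of a frame's 'used' list (proof-side measure)
def uu (used : List String) : Nat :=
  (if "L" ∈ used then 0 else 1) + (if "R" ∈ used then 0 else 1)

lemma uu_nil : uu ([] : List String) = 2 := by simp [uu]

lemma uu_lt_L (used : List String) (h : "L" ∉ used) : uu (used ++ ["L"]) < uu used := by
  simp [uu, List.mem_append, h]

lemma uu_lt_R (used : List String) (h : "R" ∉ used) : uu (used ++ ["R"]) < uu used := by
  simp [uu, List.mem_append, h]

lemma frameCost_nil (t : PNode) : frameCost (t, []) = costF t := by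
  cases t with
  | leaf i => rfl
  | node l r => simp only [frameCost, costF]; norm_num; omega

lemma frameCost_leaf (i : Int) (used : List String) : frameCost (.leaf i, used) = 1 := rfl

lemma frameCost_node (l r : PNode) (used : List String) :
    frameCost (.node l r, used) =
      1 + (if "L" ∈ used then 0 else 1 + costF l) + (if "R" ∈ used then 0 else 1 + costF r) := rfl

lemma frameCost_pos (fr : PNode × List String) : 1 ≤ frameCost fr := by
  obtain ⟨t, used⟩ := fr
  cases t with
  | leaf i => simp [frameCost_leaf]
  | node l r => rw [frameCost_node]; omega

lemma dec_pop_leaf (i : Int) (used : List String) (rest : List (PNode × List String)) :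
    stackCost rest < stackCost ((PNode.leaf i, used) :: rest) := by
  simp [stackCost, frameCost_leaf]

lemma dec_pop_node (l r : PNode) (used : List String) (rest : List (PNode × List String)) :
    stackCost rest < stackCost ((PNode.node l r, used) :: rest) := by
  simp [stackCost, frameCost_node]

lemma dec_push_left (l r : PNode) (used : List String) (rest : List (PNode × List String))
    (h : "L" ∉ used) :
    stackCost ((l, []) :: (PNode.node l r, used ++ ["L"]) :: rest) <
      stackCost ((PNode.node l r, used) :: rest) := by
  simp [stackCost, frameCost_nil, frameCost_node, List.mem_append, h]
  split_ifs <;> omega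

lemma dec_push_right (l r : PNode) (used : List String) (rest : List (PNode × List String))
    (h : "R" ∉ used) :
    stackCost ((r, []) :: (PNode.node l r, used ++ ["R"]) :: rest) <
      stackCost ((PNode.node l r, used) :: rest) := by
  simp [stackCost, frameCost_nil, frameCost_node, List.mem_append, h]
  split_ifs <;> omega

lemma stackCost_cons (fr : PNode × List String) (rest : List (PNode × List String)) :
    stackCost (fr :: rest) = frameCost fr + stackCost rest := by simp [stackCost]

lemma stackCost_cons_pos (fr : PNode × List String) (rest : List (PNode × List String)) :
    1 ≤ stackCost (fr :: rest) := by
  have := frameCost_pos fr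
  simp [stackCost]; omega

lemma buildA_leaf (g : Nat) (base : Int) (size : Nat) (h : size ≤ 1) :
    buildA g base size = .leaf base := by
  cases g <;> simp [buildA, h]

lemma buildA_node (g : Nat) (base : Int) (size : Nat) (h : ¬ size ≤ 1) :
    buildA (g + 1) base size =
      .node (buildA g base (size / 2)) (buildA g (base + ((size / 2 : Nat) : Int)) (size / 2)) := by
  simp [buildA, h]

lemma runA_nil (k v d : Int) (f : Nat) : runA k f [] v d = v := by
  cases f <;> rfl

-- with sufficient fuel, runA's value does not depend on the fuel
lemma runA_fuel (k : Int) (m : Nat) :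
    ∀ (st : List (PNode × List String)) (v d : Int) (f g : Nat),
      stackCost st ≤ m → stackCost st ≤ f → stackCost st ≤ g →
      runA k f st v d = runA k g st v d := by
  induction m using Nat.strong_induction_on with
  | _ m ih =>
    intro st v d f g hm hf hg
    match st with
    | [] => rw [runA_nil, runA_nil]
    | (t, used) :: rest =>
      have h1 : 1 ≤ stackCost ((t, used) :: rest) := stackCost_cons_pos _ _
      obtain ⟨f', rfl⟩ : ∃ f', f = f' + 1 := ⟨f - 1, by omega⟩
      obtain ⟨g', rfl⟩ : ∃ g', g = g' + 1 := ⟨g - 1, by omega⟩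
      match t with
      | .leaf id =>
        have hd := dec_pop_leaf id used rest
        rw [runA, runA]
        by_cases hk : id = k
        · simp only [hk, if_true]
        · simp only [hk, if_false]
          exact ih (m - 1) (by omega) rest _ _ f' g' (by omega) (by omega) (by omega)
      | .node l r =>
        rw [runA, runA]
        by_cases ha : PySem.Int.mod d 2 = 0 ∧ "L" ∉ used
        · simp only [if_pos ha]
          have hd := dec_push_left l r used rest ha.2
          exact ih (m - 1) (by omega) _ _ _ f' g' (by omega) (by omega) (by omega)
        · simp only [if_neg ha]
          by_cases hb : PySem.Int.mod d 2 = 1 ∧ "R" ∉ used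
          · simp only [if_pos hb]
            have hd := dec_push_right l r used rest hb.2
            exact ih (m - 1) (by omega) _ _ _ f' g' (by omega) (by omega) (by omega)
          · simp only [if_neg hb]
            by_cases hc : "L" ∉ used
            · simp only [if_pos hc]
              have hd := dec_push_left l r used rest hc
              exact ih (m - 1) (by omega) _ _ _ f' g' (by omega) (by omega) (by omega)
            · simp only [if_neg hc]
              by_cases he : "R" ∉ used
              · simp only [if_pos he]
                have hd := dec_push_right l r used rest he
                exact ih (m - 1) (by omega) _ _ _ f' g' (by omega) (by omega) (by omega)
              · simp only [if_neg he]
                have hd := dec_pop_node l r used rest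
                exact ih (m - 1) (by omega) rest _ _ f' g' (by omega) (by omega) (by omega)

lemma glue (r1 r2 : Bool × Int × Int) (g : Int → Int → Int) :
    (if r1.1 then r1.2.1 else (if r2.1 then r2.2.1 else g r2.2.1 r2.2.2)) =
      (if (if r1.1 then r1 else r2).1 then (if r1.1 then r1 else r2).2.1
       else g (if r1.1 then r1 else r2).2.1 (if r1.1 then r1 else r2).2.2) := by
  cases hr : r1.1 <;> simp [hr]

-- Simulation: running A's stack machine with a frame for (buildA g base size, used) on top
-- equals resuming B's dfs loop at (base, size) with that 'used', then continuing with the rest.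
lemma sim (k : Int) (m : Nat) :
    ∀ (g size : Nat) (base : Int) (used : List String) (rest : List (PNode × List String))
      (v d : Int) (fa fb : Nat),
      2 ^ g = size → 3 * size + uu used ≤ m → 3 * size + uu used ≤ fb →
      stackCost ((buildA g base size, used) :: rest) ≤ fa →
      runA k fa ((buildA g base size, used) :: rest) v d =
        (if (dfsB k base fb size used v d).1 then (dfsB k base fb size used v d).2.1
         else runA k fa rest (dfsB k base fb size used v d).2.1 (dfsB k base fb size used v d).2.2) := by
  induction m using Nat.strong_induction_on with
  | _ m ih =>
    intro g size base used rest v d fa fb hg hm hfb hfa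
    have hsz1 : 1 ≤ size := by rw [← hg]; exact Nat.one_le_two_pow
    have h1 : 1 ≤ stackCost ((buildA g base size, used) :: rest) := stackCost_cons_pos _ _
    obtain ⟨fa', rfl⟩ : ∃ fa', fa = fa' + 1 := ⟨fa - 1, by omega⟩
    obtain ⟨fb', rfl⟩ : ∃ fb', fb = fb' + 1 := ⟨fb - 1, by omega⟩
    have hrest : stackCost rest ≤ fa' := by
      have : stackCost ((buildA g base size, used) :: rest) =
          frameCost (buildA g base size, used) + stackCost rest := by simp [stackCost]
      have := frameCost_pos (buildA g base size, used)
      omega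
    by_cases hs : size ≤ 1
    · rw [buildA_leaf g base size hs]
      rw [runA, dfsB]
      simp only [hs, if_true]
      by_cases hk : base = k
      · simp [hk]
      · rw [runA_fuel k (stackCost rest) rest _ _ fa' (fa' + 1) (le_refl _) hrest (by omega)]
        simp [hk]
    · -- internal node: size = 2^g with g ≥ 1
      obtain ⟨g', rfl⟩ : ∃ g', g = g' + 1 := by
        cases g with
        | zero => simp at hg; omega
        | succ g' => exact ⟨g', rfl⟩
      have hghalf : 2 ^ g' = size / 2 := by
        rw [← hg]; rw [pow_succ]; omega
      have hhalf1 : 1 ≤ size / 2 := by rw [← hghalf]; exact Nat.one_le_two_pow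
      rw [buildA_node g' base size hs]
      rw [runA, dfsB]
      simp only [hs, if_false]
      have hmc : 3 * (size / 2) + uu ([] : List String) ≤ m - 1 := by rw [uu_nil]; omega
      have hfbc : 3 * (size / 2) + uu ([] : List String) ≤ fb' := by rw [uu_nil]; omega
      by_cases ha : PySem.Int.mod d 2 = 0 ∧ "L" ∉ used
      · simp only [if_pos ha]
        rw [← buildA_node g' base size hs]
        have hd := dec_push_left (buildA g' base (size / 2))
          (buildA g' (base + ((size / 2 : Nat) : Int)) (size / 2)) used rest ha.2
        rw [← buildA_node g' base size hs] at hd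
        have hsc := stackCost_cons (buildA g' base (size / 2), []) ((buildA (g' + 1) base size, used ++ ["L"]) :: rest)
        have hfp := frameCost_pos (buildA g' base (size / 2), [])
        have hmL : 3 * size + uu (used ++ ["L"]) ≤ m - 1 := by
          have := uu_lt_L used ha.2; omega
        have hfbL : 3 * size + uu (used ++ ["L"]) ≤ fb' := by
          have := uu_lt_L used ha.2; omega
        rw [ih (m - 1) (by omega) g' (size / 2) base [] _ (v + 1) (d + 1) fa' fb' hghalf hmc hfbc
          (by omega)]
        rw [ih (m - 1) (by omega) (g' + 1) size base (used ++ ["L"]) rest _ _ fa' fb'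
          hg hmL hfbL (by omega)]
        rw [runA_fuel k (stackCost rest) rest _ _ fa' (fa' + 1) (le_refl _) hrest (by omega)]
        exact glue _ _ _
      · simp only [if_neg ha]
        by_cases hb : PySem.Int.mod d 2 = 1 ∧ "R" ∉ used
        · simp only [if_pos hb]
          rw [← buildA_node g' base size hs]
          have hd := dec_push_right (buildA g' base (size / 2))
            (buildA g' (base + ((size / 2 : Nat) : Int)) (size / 2)) used rest hb.2
          rw [← buildA_node g' base size hs] at hd
          have hsc := stackCost_cons (buildA g' (base + ((size / 2 : Nat) : Int)) (size / 2), []) ((buildA (g' + 1) base size, used ++ ["R"]) :: rest)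
          have hfp := frameCost_pos (buildA g' (base + ((size / 2 : Nat) : Int)) (size / 2), [])
          have hmR : 3 * size + uu (used ++ ["R"]) ≤ m - 1 := by
            have := uu_lt_R used hb.2; omega
          have hfbR : 3 * size + uu (used ++ ["R"]) ≤ fb' := by
            have := uu_lt_R used hb.2; omega
          rw [ih (m - 1) (by omega) g' (size / 2) (base + ((size / 2 : Nat) : Int)) [] _ (v + 1) (d + 1) fa' fb' hghalf hmc hfbc
            (by omega)]
          rw [ih (m - 1) (by omega) (g' + 1) size base (used ++ ["R"]) rest _ _ fa' fb'
            hg hmR hfbR (by omega)]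
          rw [runA_fuel k (stackCost rest) rest _ _ fa' (fa' + 1) (le_refl _) hrest (by omega)]
          exact glue _ _ _
        · simp only [if_neg hb]
          by_cases hcm : "L" ∉ used
          · simp only [if_pos hcm]
            rw [← buildA_node g' base size hs]
            have hd := dec_push_left (buildA g' base (size / 2))
              (buildA g' (base + ((size / 2 : Nat) : Int)) (size / 2)) used rest hcm
            rw [← buildA_node g' base size hs] at hd
            have hsc := stackCost_cons (buildA g' base (size / 2), []) ((buildA (g' + 1) base size, used ++ ["L"]) :: rest)
            have hfp := frameCost_pos (buildA g' base (size / 2), [])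
            have hmL : 3 * size + uu (used ++ ["L"]) ≤ m - 1 := by
              have := uu_lt_L used hcm; omega
            have hfbL : 3 * size + uu (used ++ ["L"]) ≤ fb' := by
              have := uu_lt_L used hcm; omega
            rw [ih (m - 1) (by omega) g' (size / 2) base [] _ (v + 1) (d + 1) fa' fb' hghalf hmc hfbc
              (by omega)]
            rw [ih (m - 1) (by omega) (g' + 1) size base (used ++ ["L"]) rest _ _ fa' fb'
              hg hmL hfbL (by omega)]
            rw [runA_fuel k (stackCost rest) rest _ _ fa' (fa' + 1) (le_refl _) hrest (by omega)]
            exact glue _ _ _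
          · simp only [if_neg hcm]
            by_cases he : "R" ∉ used
            · simp only [if_pos he]
              rw [← buildA_node g' base size hs]
              have hd := dec_push_right (buildA g' base (size / 2))
                (buildA g' (base + ((size / 2 : Nat) : Int)) (size / 2)) used rest he
              rw [← buildA_node g' base size hs] at hd
              have hsc := stackCost_cons (buildA g' (base + ((size / 2 : Nat) : Int)) (size / 2), []) ((buildA (g' + 1) base size, used ++ ["R"]) :: rest)
              have hfp := frameCost_pos (buildA g' (base + ((size / 2 : Nat) : Int)) (size / 2), [])
              have hmR : 3 * size + uu (used ++ ["R"]) ≤ m - 1 := by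
                have := uu_lt_R used he; omega
              have hfbR : 3 * size + uu (used ++ ["R"]) ≤ fb' := by
                have := uu_lt_R used he; omega
              rw [ih (m - 1) (by omega) g' (size / 2) (base + ((size / 2 : Nat) : Int)) [] _ (v + 1) (d + 1) fa' fb' hghalf hmc hfbc
                (by omega)]
              rw [ih (m - 1) (by omega) (g' + 1) size base (used ++ ["R"]) rest _ _ fa' fb'
                hg hmR hfbR (by omega)]
              rw [runA_fuel k (stackCost rest) rest _ _ fa' (fa' + 1) (le_refl _) hrest (by omega)]
              exact glue _ _ _
            · simp only [if_neg he]
              rw [runA_fuel k (stackCost rest) rest _ _ fa' (fa' + 1) (le_refl _) hrest (by omega)]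
              simp

-- ===== VERDICT (by name: the statement is the Claim_ definition above) =====
theorem visited_count_spec : Claim_equal_visited_count := by
  intro n k _ _
  unfold Spec_visited_count visited_count visited_count_alt
  rw [sim k (3 * 2 ^ n.toNat + 2) n.toNat (2 ^ n.toNat) 1 [] [] 0 0
    (stackCost [(buildA n.toNat 1 (2 ^ n.toNat), [])]) (3 * 2 ^ n.toNat + 2)
    rfl (by rw [uu_nil]) (by rw [uu_nil]) (le_refl _)]
  rw [runA_nil]
  exact ite_self _
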